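-- pv_equiv track=rewrite | github.com/Shakour-Data/AutoProjectManagement | wiki_sync_service.py | _has_consistent_formatting
-- ===== SOURCE A (Python) =====
-- def _has_consistent_formatting(content: str) -> bool:
--     """Check for consistent formatting"""
--     # Simple check for consistent bullet points
--     lines = content.split('\n')
--     bullet_styles = set()
--
--     for line in lines:
--         line = line.strip()
--         if line.startswith('- '):
--             bullet_styles.add('dash')
--         elif line.startswith('* '):
--             bullet_styles.add('asterisk')
--         elif line.startswith('+ '):
--             bullet_styles.add('plus')
--
--     return len(bullet_styles) <= 1
-- ===== SOURCE B (Python) =====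
-- def _has_consistent_formatting(content: str) -> bool:
--     """Check for consistent formatting"""
--     lines = content.split('\n')
--     has_dash = any(line.strip().startswith('- ') for line in lines)
--     has_asterisk = any(line.strip().startswith('* ') for line in lines)
--     has_plus = any(line.strip().startswith('+ ') for line in lines)
--     return has_dash + has_asterisk + has_plus <= 1
-- ===== Notes on version B (the rewrite author's own statement) =====
-- stated objective: simpler
-- what changed: Replaces the single pass that accumulates a set of seen bullet styles with three independent any-scans producing boolean flags, returning whether at most one flag is set.
import Mathlib
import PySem

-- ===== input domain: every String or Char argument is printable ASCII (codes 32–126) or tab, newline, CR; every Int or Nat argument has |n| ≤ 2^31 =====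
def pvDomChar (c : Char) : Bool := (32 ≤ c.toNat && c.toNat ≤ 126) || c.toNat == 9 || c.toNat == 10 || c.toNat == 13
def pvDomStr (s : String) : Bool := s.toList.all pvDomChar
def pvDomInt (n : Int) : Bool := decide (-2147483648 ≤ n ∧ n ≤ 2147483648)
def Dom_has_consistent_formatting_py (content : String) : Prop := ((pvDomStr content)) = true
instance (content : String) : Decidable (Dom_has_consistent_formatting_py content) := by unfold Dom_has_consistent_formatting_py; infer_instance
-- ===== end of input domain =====

-- B replaces A's single set-accumulating pass with three independent any-scans (simpler decomposition, same cost).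

-- ===== PORT A =====
-- content.split('\n'): Str.split? is some for the non-empty separator "\n", so .getD [] is exact here.
def has_consistent_formatting_py (content : String) : Bool :=
  let lines := (PySem.Str.split? content "\n").getD []
  let bullet_styles : PySem.Set String :=
    lines.foldl (fun styles line =>
      let l := PySem.Str.strip line
      if PySem.Str.startswith l "- " then PySem.Set.add styles "dash"
      else if PySem.Str.startswith l "* " then PySem.Set.add styles "asterisk"
      else if PySem.Str.startswith l "+ " then PySem.Set.add styles "plus"
      else styles) PySem.Set.empty
  decide (PySem.Set.len bullet_styles ≤ 1)

-- ===== PORT B =====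
def has_consistent_formatting_py_alt (content : String) : Bool :=
  let lines := (PySem.Str.split? content "\n").getD []
  let has_dash := lines.any (fun line => PySem.Str.startswith (PySem.Str.strip line) "- ")
  let has_asterisk := lines.any (fun line => PySem.Str.startswith (PySem.Str.strip line) "* ")
  let has_plus := lines.any (fun line => PySem.Str.startswith (PySem.Str.strip line) "+ ")
  decide ((cond has_dash 1 0) + (cond has_asterisk 1 0) + (cond has_plus 1 0) ≤ (1 : Nat))

-- ===== PRECONDITION & SPEC =====
def Spec_has_consistent_formatting_py (content : String) (out : Bool) : Prop := out = has_consistent_formatting_py_alt content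
instance (content : String) (out : Bool) : Decidable (Spec_has_consistent_formatting_py content out) := by unfold Spec_has_consistent_formatting_py; infer_instance

-- ===== CLAIM (what is proved, stated in full; the proofs are below) =====
def Claim_equal_has_consistent_formatting_py : Prop := ∀ (content : String), Dom_has_consistent_formatting_py content → Spec_has_consistent_formatting_py content (has_consistent_formatting_py content)

-- ===== LEMMAS AND PROOFS =====

-- the style (if any) a single stripped line contributes in A's loop body
def pvStyleOf (line : String) : Option String :=
  if PySem.Str.startswith (PySem.Str.strip line) "- " then some "dash"
  else if PySem.Str.startswith (PySem.Str.strip line) "* " then some "asterisk"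
  else if PySem.Str.startswith (PySem.Str.strip line) "+ " then some "plus"
  else none

-- the three two-character bullet prefixes are mutually exclusive
lemma pv_excl (t : List Char) (c d : Char) (hcd : c ≠ d)
    (h : PySem.Chars.startswith t [c, ' '] = true) :
    PySem.Chars.startswith t [d, ' '] = false := by
  rcases (PySem.Chars.startswith_iff t [c, ' ']).1 h with ⟨r, hr⟩
  subst hr
  by_contra hx
  simp only [Bool.not_eq_false] at hx
  rcases (PySem.Chars.startswith_iff _ _).1 hx with ⟨r2, hr2⟩
  simp only [List.cons_append, List.nil_append, List.cons.injEq] at hr2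
  exact hcd hr2.1.symm

-- A's fold is the Python set of the styles contributed by the lines, in first-seen order
lemma pv_foldl_eq_ofList (lines : List String) (s : PySem.Set String) :
    lines.foldl (fun styles line =>
      let l := PySem.Str.strip line
      if PySem.Str.startswith l "- " then PySem.Set.add styles "dash"
      else if PySem.Str.startswith l "* " then PySem.Set.add styles "asterisk"
      else if PySem.Str.startswith l "+ " then PySem.Set.add styles "plus"
      else styles) s
    = (lines.filterMap pvStyleOf).foldl PySem.Set.add s := by
  induction lines generalizing s with
  | nil => simp
  | cons hd tl ih =>
    rw [List.foldl_cons, List.filterMap_cons, ih]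
    unfold pvStyleOf
    by_cases h1 : PySem.Str.startswith (PySem.Str.strip hd) "- " = true
    · simp only [h1, if_true, List.foldl_cons]
    · by_cases h2 : PySem.Str.startswith (PySem.Str.strip hd) "* " = true
      · simp only [h1, h2, Bool.false_eq_true, if_false, if_true, List.foldl_cons]
      · by_cases h3 : PySem.Str.startswith (PySem.Str.strip hd) "+ " = true
        · simp only [h1, h2, h3, Bool.false_eq_true, if_false, if_true, List.foldl_cons]
        · simp only [h1, h2, h3, Bool.false_eq_true, if_false]

-- a set whose members are among the three style names has length = number of members present
lemma pv_style_mem (ys : List String) (h : ∀ x ∈ ys, x = "dash" ∨ x = "asterisk" ∨ x = "plus") :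
    (PySem.Set.ofList ys).length =
      (if "dash" ∈ ys then 1 else 0) + (if "asterisk" ∈ ys then 1 else 0)
        + (if "plus" ∈ ys then 1 else 0) := by
  have hnd : List.Nodup (PySem.Set.ofList ys) := PySem.Set.nodup_ofList ys
  have hperm : List.Perm (PySem.Set.ofList ys)
      (List.filter (fun x => decide (x ∈ ys)) ["dash", "asterisk", "plus"]) := by
    rw [List.perm_ext_iff_of_nodup hnd]
    · intro a
      simp only [List.mem_filter, decide_eq_true_eq, PySem.Set.mem_ofList]
      constructor
      · intro ha
        refine ⟨?_, ha⟩
        rcases h a ha with h' | h' | h' <;> simp [h']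
      · exact fun h => h.2
    · refine List.Nodup.filter _ ?_
      decide
  rw [hperm.length_eq]
  by_cases hd : "dash" ∈ ys <;> by_cases ha : "asterisk" ∈ ys <;> by_cases hp : "plus" ∈ ys <;>
    simp [List.filter, hd, ha, hp]

-- B's any-scan over the lines is membership of the corresponding style in the contributed styles
lemma pv_any_iff (lines : List String) (pre sty : String)
    (hpre : ∀ l, pvStyleOf l = some sty ↔ PySem.Str.startswith (PySem.Str.strip l) pre = true) :
    (lines.any (fun line => PySem.Str.startswith (PySem.Str.strip line) pre))
      = decide (sty ∈ lines.filterMap pvStyleOf) := by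
  rw [Bool.eq_iff_iff]
  simp only [List.any_eq_true, List.mem_filterMap, decide_eq_true_eq]
  constructor
  · rintro ⟨l, hl, hs⟩; exact ⟨l, hl, (hpre l).2 hs⟩
  · rintro ⟨l, hl, hs⟩; exact ⟨l, hl, (hpre l).1 hs⟩

lemma pv_hdash : ∀ l, pvStyleOf l = some "dash" ↔ PySem.Str.startswith (PySem.Str.strip l) "- " = true := by
  intro l
  unfold pvStyleOf
  constructor
  · intro h; split_ifs at h with h1 h2 h3 <;> simp_all
  · intro h; rw [if_pos h]

lemma pv_hast : ∀ l, pvStyleOf l = some "asterisk" ↔ PySem.Str.startswith (PySem.Str.strip l) "* " = true := by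
  intro l
  unfold pvStyleOf
  constructor
  · intro h; split_ifs at h with h1 h2 h3 <;> simp_all
  · intro h
    have h1 := pv_excl (PySem.Chars.strip l.toList) '*' '-' (by decide) (by simpa using h)
    rw [if_neg (by simp [h1]), if_pos h]

lemma pv_hplus : ∀ l, pvStyleOf l = some "plus" ↔ PySem.Str.startswith (PySem.Str.strip l) "+ " = true := by
  intro l
  unfold pvStyleOf
  constructor
  · intro h; split_ifs at h with h1 h2 h3 <;> simp_all
  · intro h
    have h1 := pv_excl (PySem.Chars.strip l.toList) '+' '-' (by decide) (by simpa using h)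
    have h2 := pv_excl (PySem.Chars.strip l.toList) '+' '*' (by decide) (by simpa using h)
    rw [if_neg (by simp [h1]), if_neg (by simp [h2]), if_pos h]

-- the list-level statement behind the claim
lemma pv_lines (lines : List String) :
    decide (PySem.Set.len (lines.foldl (fun styles line =>
      let l := PySem.Str.strip line
      if PySem.Str.startswith l "- " then PySem.Set.add styles "dash"
      else if PySem.Str.startswith l "* " then PySem.Set.add styles "asterisk"
      else if PySem.Str.startswith l "+ " then PySem.Set.add styles "plus"
      else styles) PySem.Set.empty) ≤ 1)
    = decide ((cond (lines.any (fun line => PySem.Str.startswith (PySem.Str.strip line) "- ")) 1 0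
        + cond (lines.any (fun line => PySem.Str.startswith (PySem.Str.strip line) "* ")) 1 0
        + cond (lines.any (fun line => PySem.Str.startswith (PySem.Str.strip line) "+ ")) 1 0 : Nat) ≤ 1) := by
  rw [pv_foldl_eq_ofList, show (PySem.Set.empty : PySem.Set String) = [] from rfl,
      ← PySem.Set.ofList_eq_foldl,
      pv_any_iff lines "- " "dash" pv_hdash, pv_any_iff lines "* " "asterisk" pv_hast,
      pv_any_iff lines "+ " "plus" pv_hplus]
  have hsub : ∀ x ∈ lines.filterMap pvStyleOf, x = "dash" ∨ x = "asterisk" ∨ x = "plus" := by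
    intro x hx
    rcases List.mem_filterMap.1 hx with ⟨l, _, hl⟩
    unfold pvStyleOf at hl
    split_ifs at hl <;> simp_all
  rw [show PySem.Set.len (PySem.Set.ofList (lines.filterMap pvStyleOf))
        = ((PySem.Set.ofList (lines.filterMap pvStyleOf)).length : Int) from rfl,
      pv_style_mem _ hsub]
  by_cases hd : "dash" ∈ lines.filterMap pvStyleOf <;>
    by_cases ha : "asterisk" ∈ lines.filterMap pvStyleOf <;>
      by_cases hp : "plus" ∈ lines.filterMap pvStyleOf <;>
        simp [hd, ha, hp]

-- ===== VERDICT (by name: the statement is the Claim_ definition above) =====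
theorem has_consistent_formatting_py_spec : Claim_equal_has_consistent_formatting_py := by
  intro content _
  unfold Spec_has_consistent_formatting_py has_consistent_formatting_py has_consistent_formatting_py_alt
  exact pv_lines ((PySem.Str.split? content "\n").getD [])
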